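-- pv_equiv track=rewrite | github.com/matthewnbrown/roc-cluster | api/job_manager.py | _summarize_get_metadata_results
-- ===== SOURCE A (Python) =====
-- from typing import List, Dict, Any, Optional
--
-- def _summarize_get_metadata_results(successful_results: List[Dict]) -> Dict[str, Any]:
--     """Summarize get metadata action results"""
--     summary = {
--         "metadata_retrieved": 0,
--         "retrievals_successful": 0,
--         "retrievals_failed": 0,
--         "accounts_updated": 0,
--         "total_retries": 0
--     }
--
--     for result in successful_results:
--         result_data = result.get("result", {})
--         if isinstance(result_data, dict):
--             summary["total_retries"] += result_data.get("retries", 0)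
--             if result_data.get("success"):
--                 summary["retrievals_successful"] += 1
--                 summary["metadata_retrieved"] += 1
--                 if result_data.get("account_updated"):
--                     summary["accounts_updated"] += 1
--             else:
--                 summary["retrievals_failed"] += 1
--
--     return summary
-- ===== SOURCE B (Python) =====
-- from typing import List, Dict, Any, Optional
--
-- def _summarize_get_metadata_results(successful_results: List[Dict]) -> Dict[str, Any]:
--     """Summarize get metadata action results"""
--     m, s, f, u, t = _tally(successful_results)
--     return {
--         "metadata_retrieved": m,
--         "retrievals_successful": s,
--         "retrievals_failed": f,
--         "accounts_updated": u,
--         "total_retries": t,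
--     }
--
-- def _tally(results):
--     """Divide-and-conquer: tally of a list = componentwise merge of the two halves."""
--     n = len(results)
--     if n == 0:
--         return (0, 0, 0, 0, 0)
--     if n == 1:
--         rd = results[0].get("result", {})
--         if not isinstance(rd, dict):
--             return (0, 0, 0, 0, 0)
--         if rd.get("success"):
--             return (1, 1, 0, 1 if rd.get("account_updated") else 0, rd.get("retries", 0))
--         return (0, 0, 1, 0, rd.get("retries", 0))
--     left = _tally(results[:n // 2])
--     right = _tally(results[n // 2:])
--     return tuple(x + y for x, y in zip(left, right))
-- ===== Notes on version B (the rewrite author's own statement) =====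
-- stated objective: alternative
-- what changed: A's single fused loop mutating five counters is replaced by a divide-and-conquer recursion: each singleton record yields a 5-tuple contribution and the summary of a list is the componentwise merge of the summaries of its two halves; correctness follows because componentwise addition is associative, so the merge tree computes the same totals.
import Mathlib
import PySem

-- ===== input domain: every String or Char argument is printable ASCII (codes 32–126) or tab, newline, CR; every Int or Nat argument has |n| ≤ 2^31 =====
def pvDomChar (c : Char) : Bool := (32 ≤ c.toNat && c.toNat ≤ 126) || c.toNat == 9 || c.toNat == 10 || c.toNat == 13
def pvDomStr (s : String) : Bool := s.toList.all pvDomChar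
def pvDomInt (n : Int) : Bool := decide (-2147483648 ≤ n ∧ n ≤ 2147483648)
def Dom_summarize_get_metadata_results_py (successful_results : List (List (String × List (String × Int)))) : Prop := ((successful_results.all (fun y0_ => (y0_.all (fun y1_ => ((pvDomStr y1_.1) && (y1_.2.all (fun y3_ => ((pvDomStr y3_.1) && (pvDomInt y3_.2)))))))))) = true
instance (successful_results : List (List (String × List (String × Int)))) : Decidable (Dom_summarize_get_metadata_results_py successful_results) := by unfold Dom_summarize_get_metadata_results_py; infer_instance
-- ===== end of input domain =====

-- B replaces A's single fused counter loop by a divide-and-conquer recursion merging half-summaries componentwise (objective: alternative decomposition, same cost).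


-- ===== PORT A =====
-- fused loop over a 5-counter state (metadata_retrieved, retrievals_successful, retrievals_failed, accounts_updated, total_retries);
-- under the type convention every "result" value is a dict, so A's isinstance(result_data, dict) check is always true and is not reified.
def pvStepA (acc : Int × Int × Int × Int × Int) (result : List (String × List (String × Int))) : Int × Int × Int × Int × Int :=
  let rd := (PySem.Dict.mk result).getD "result" []
  let tr := acc.2.2.2.2 + (PySem.Dict.mk rd).getD "retries" 0
  if (PySem.Dict.mk rd).getD "success" 0 != 0 then
    (acc.1 + 1, acc.2.1 + 1, acc.2.2.1,
      (if (PySem.Dict.mk rd).getD "account_updated" 0 != 0 then acc.2.2.2.1 + 1 else acc.2.2.2.1), tr)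
  else
    (acc.1, acc.2.1, acc.2.2.1 + 1, acc.2.2.2.1, tr)

def summarize_get_metadata_results_py (successful_results : List (List (String × List (String × Int)))) : List (String × Int) :=
  let s := successful_results.foldl pvStepA (0, 0, 0, 0, 0)
  [("metadata_retrieved", s.1), ("retrievals_successful", s.2.1),
   ("retrievals_failed", s.2.2.1), ("accounts_updated", s.2.2.2.1),
   ("total_retries", s.2.2.2.2)]

-- ===== PORT B =====
-- divide and conquer: singleton base case gives a 5-tuple, halves are merged by componentwise addition
def pvTally : List (List (String × List (String × Int))) → Int × Int × Int × Int × Int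
  | [] => (0, 0, 0, 0, 0)
  | [r] =>
    let rd := (PySem.Dict.mk r).getD "result" []
    if (PySem.Dict.mk rd).getD "success" 0 != 0 then
      (1, 1, 0, (if (PySem.Dict.mk rd).getD "account_updated" 0 != 0 then 1 else 0),
        (PySem.Dict.mk rd).getD "retries" 0)
    else (0, 0, 1, 0, (PySem.Dict.mk rd).getD "retries" 0)
  | x :: y :: rest =>
    let l := x :: y :: rest
    let left := pvTally (l.take (l.length / 2))
    let right := pvTally (l.drop (l.length / 2))
    (left.1 + right.1, left.2.1 + right.2.1, left.2.2.1 + right.2.2.1,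
      left.2.2.2.1 + right.2.2.2.1, left.2.2.2.2 + right.2.2.2.2)
  termination_by l => l.length
  decreasing_by
    · simp [List.length_take]; omega
    · simp; omega

def summarize_get_metadata_results_py_alt (successful_results : List (List (String × List (String × Int)))) : List (String × Int) :=
  let t := pvTally successful_results
  [("metadata_retrieved", t.1), ("retrievals_successful", t.2.1),
   ("retrievals_failed", t.2.2.1), ("accounts_updated", t.2.2.2.1),
   ("total_retries", t.2.2.2.2)]

-- ===== PRECONDITION & SPEC =====
def Spec_summarize_get_metadata_results_py (successful_results : List (List (String × List (String × Int)))) (out : List (String × Int)) : Prop := out = summarize_get_metadata_results_py_alt successful_results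
instance (successful_results : List (List (String × List (String × Int)))) (out : List (String × Int)) : Decidable (Spec_summarize_get_metadata_results_py successful_results out) := by unfold Spec_summarize_get_metadata_results_py; infer_instance

-- ===== CLAIM (what is proved, stated in full; the proofs are below) =====
def Claim_equal_summarize_get_metadata_results_py : Prop := ∀ (successful_results : List (List (String × List (String × Int)))), Dom_summarize_get_metadata_results_py successful_results → Spec_summarize_get_metadata_results_py successful_results (summarize_get_metadata_results_py successful_results)

-- ===== LEMMAS AND PROOFS =====
-- per-record contribution vector; both programs compute its sum over the list
def pvContrib (r : List (String × List (String × Int))) : Int × Int × Int × Int × Int :=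
  let rd := (PySem.Dict.mk r).getD "result" []
  if (PySem.Dict.mk rd).getD "success" 0 != 0 then
    (1, 1, 0, (if (PySem.Dict.mk rd).getD "account_updated" 0 != 0 then 1 else 0),
      (PySem.Dict.mk rd).getD "retries" 0)
  else (0, 0, 1, 0, (PySem.Dict.mk rd).getD "retries" 0)

theorem pvStepA_eq (a : Int × Int × Int × Int × Int) (x : List (String × List (String × Int))) :
    pvStepA a x = a + pvContrib x := by
  obtain ⟨a1, a2, a3, a4, a5⟩ := a
  simp only [pvStepA, pvContrib]
  split_ifs <;> simp [Prod.mk_add_mk]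

theorem pvFoldA_eq (l : List (List (String × List (String × Int)))) (a : Int × Int × Int × Int × Int) :
    l.foldl pvStepA a = a + (l.map pvContrib).sum := by
  induction l generalizing a with
  | nil => simp
  | cons x xs ih => simp [List.foldl_cons, ih, pvStepA_eq, add_assoc]

theorem pvTally_eq (l : List (List (String × List (String × Int)))) :
    pvTally l = (l.map pvContrib).sum := by
  fun_induction pvTally l with
  | case1 => simp
  | case2 r rd h => simp only [rd] at h ⊢; simp [pvContrib, h]
  | case3 r rd h => simp only [rd] at h ⊢; simp [pvContrib, h]
  | case4 x y rest l left right ihL ihR =>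
    simp only [left, right, l] at ihL ihR ⊢
    rw [ihL, ihR]
    have h := List.take_append_drop ((x :: y :: rest).length / 2) (x :: y :: rest)
    conv_rhs => rw [← h]
    rw [List.map_append, List.sum_append]
    obtain ⟨b1, b2, b3, b4, b5⟩ := (((x :: y :: rest).take ((x :: y :: rest).length / 2)).map pvContrib).sum
    obtain ⟨c1, c2, c3, c4, c5⟩ := (((x :: y :: rest).drop ((x :: y :: rest).length / 2)).map pvContrib).sum
    simp [Prod.mk_add_mk]

-- ===== VERDICT (by name: the statement is the Claim_ definition above) =====
theorem summarize_get_metadata_results_py_spec : Claim_equal_summarize_get_metadata_results_py := by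
  intro srs _
  unfold Spec_summarize_get_metadata_results_py summarize_get_metadata_results_py summarize_get_metadata_results_py_alt
  simp [pvFoldA_eq, pvTally_eq]
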